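-- pv_equiv track=rewrite | github.com/Badgujarsiddhi/CI-CD_Automate | backend/main.py | infer_gene_phenotype
-- ===== SOURCE A (Python) =====
-- from typing import List, Dict, Any
--
-- PGX_VARIANT_EFFECTS: Dict[str, Dict[str, str]] = {
--     "CYP2C19": {
--         "rs4244285": "LOF",  # *2
--         "rs4986893": "LOF",  # *3
--         "rs12248560": "GOF",  # *17
--     },
--     "CYP2C9": {
--         "rs1799853": "LOF",  # *2
--         "rs1057910": "LOF",  # *3
--     },
--     "CYP2D6": {
--         "rs3892097": "LOF",  # *4
--         "rs5030655": "LOF",  # *3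
--     },
--     "SLCO1B1": {
--         "rs4149056": "LOF",  # *5
--     },
--     "TPMT": {
--         "rs1800460": "LOF",  # *3A
--         "rs1142345": "LOF",
--     },
--     "DPYD": {
--         "rs3918290": "LOF",  # *2A
--         "rs55886062": "LOF",  # D949V
--     },
-- }
--
-- def infer_gene_phenotype(gene: str, rsids_for_gene: List[str]) -> Dict[str, str]:
--     """
--     Very simplified star-allele / phenotype inference for demo purposes.
--     """
--     if not gene or not rsids_for_gene:
--         return {"diplotype": "*1/*1", "phenotype": "NM"}
--
--     effects = PGX_VARIANT_EFFECTS.get(gene, {})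
--     lof_present = any(effects.get(r) == "LOF" for r in rsids_for_gene)
--     gof_present = any(effects.get(r) == "GOF" for r in rsids_for_gene)
--
--     if lof_present and gof_present:
--         diplotype = "*1/*2"
--         phenotype = "IM"
--     elif lof_present:
--         diplotype = "*2/*2"
--         phenotype = "PM"
--     elif gof_present:
--         diplotype = "*1/*17"
--         phenotype = "RM"
--     else:
--         diplotype = "*1/*1"
--         phenotype = "NM"
--
--     return {"diplotype": diplotype, "phenotype": phenotype}
-- ===== SOURCE B (Python) =====
-- from typing import List, Dict
--
-- # Inverted index: gene -> effect -> set of rsids carrying that effect.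
-- EFFECT_RSIDS: Dict[str, Dict[str, frozenset]] = {
--     "CYP2C19": {"LOF": frozenset({"rs4244285", "rs4986893"}), "GOF": frozenset({"rs12248560"})},
--     "CYP2C9": {"LOF": frozenset({"rs1799853", "rs1057910"})},
--     "CYP2D6": {"LOF": frozenset({"rs3892097", "rs5030655"})},
--     "SLCO1B1": {"LOF": frozenset({"rs4149056"})},
--     "TPMT": {"LOF": frozenset({"rs1800460", "rs1142345"})},
--     "DPYD": {"LOF": frozenset({"rs3918290", "rs55886062"})},
-- }
--
-- # Result table keyed by the set of effects present among the patient's variants.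
-- RESULTS: Dict[frozenset, Dict[str, str]] = {
--     frozenset({"LOF", "GOF"}): {"diplotype": "*1/*2", "phenotype": "IM"},
--     frozenset({"LOF"}): {"diplotype": "*2/*2", "phenotype": "PM"},
--     frozenset({"GOF"}): {"diplotype": "*1/*17", "phenotype": "RM"},
--     frozenset(): {"diplotype": "*1/*1", "phenotype": "NM"},
-- }
--
--
-- def infer_gene_phenotype(gene: str, rsids_for_gene: List[str]) -> Dict[str, str]:
--     if not gene or not rsids_for_gene:
--         return dict(RESULTS[frozenset()])
--     seen = frozenset(rsids_for_gene)
--     present = frozenset(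
--         effect
--         for effect, ids in EFFECT_RSIDS.get(gene, {}).items()
--         if not seen.isdisjoint(ids)
--     )
--     return dict(RESULTS[present])
-- ===== Notes on version B (the rewrite author's own statement) =====
-- stated objective: faster
-- what changed: Replaces A's per-rsid effect lookups (two any() scans with a dict.get per element) and four-way if/elif by an inverted index gene->effect->rsid set, C-level frozenset intersection tests against the set of the patient's rsids, and a result table keyed by the frozenset of effects present.
import Mathlib
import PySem

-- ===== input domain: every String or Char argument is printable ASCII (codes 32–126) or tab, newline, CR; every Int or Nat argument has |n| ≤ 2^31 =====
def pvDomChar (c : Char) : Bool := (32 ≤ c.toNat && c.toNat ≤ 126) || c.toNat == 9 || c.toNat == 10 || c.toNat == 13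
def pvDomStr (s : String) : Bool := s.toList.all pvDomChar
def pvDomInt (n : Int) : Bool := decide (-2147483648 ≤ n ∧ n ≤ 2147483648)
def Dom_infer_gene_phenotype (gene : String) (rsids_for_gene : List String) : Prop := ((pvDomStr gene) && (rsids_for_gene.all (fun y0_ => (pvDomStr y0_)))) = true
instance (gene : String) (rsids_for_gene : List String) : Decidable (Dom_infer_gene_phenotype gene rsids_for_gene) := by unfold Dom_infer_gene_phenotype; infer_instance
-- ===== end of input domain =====

-- B replaces A's per-rsid effect lookups and if/elif chain by an inverted index
-- (gene -> effect -> rsid set), set intersection, and a frozenset-keyed result table (objective: alternative).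


-- ===== PORT A =====
-- module constant PGX_VARIANT_EFFECTS
def pvPGX : PySem.Dict String (PySem.Dict String String) :=
  PySem.Dict.ofList
    [ ("CYP2C19", PySem.Dict.ofList [("rs4244285", "LOF"), ("rs4986893", "LOF"), ("rs12248560", "GOF")])
    , ("CYP2C9",  PySem.Dict.ofList [("rs1799853", "LOF"), ("rs1057910", "LOF")])
    , ("CYP2D6",  PySem.Dict.ofList [("rs3892097", "LOF"), ("rs5030655", "LOF")])
    , ("SLCO1B1", PySem.Dict.ofList [("rs4149056", "LOF")])
    , ("TPMT",    PySem.Dict.ofList [("rs1800460", "LOF"), ("rs1142345", "LOF")])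
    , ("DPYD",    PySem.Dict.ofList [("rs3918290", "LOF"), ("rs55886062", "LOF")]) ]

def infer_gene_phenotype (gene : String) (rsids_for_gene : List String) : List (String × String) :=
  if gene = "" ∨ rsids_for_gene = [] then [("diplotype", "*1/*1"), ("phenotype", "NM")]
  else
    let effects := (pvPGX.get? gene).getD PySem.Dict.empty
    let lof_present := rsids_for_gene.any (fun r => effects.get? r == some "LOF")
    let gof_present := rsids_for_gene.any (fun r => effects.get? r == some "GOF")
    if lof_present && gof_present then [("diplotype", "*1/*2"), ("phenotype", "IM")]
    else if lof_present then [("diplotype", "*2/*2"), ("phenotype", "PM")]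
    else if gof_present then [("diplotype", "*1/*17"), ("phenotype", "RM")]
    else [("diplotype", "*1/*1"), ("phenotype", "NM")]

-- ===== PORT B =====
-- module constant EFFECT_RSIDS: inverted index gene -> effect -> rsid set
def pvEffectRsids : PySem.Dict String (PySem.Dict String (PySem.Set String)) :=
  PySem.Dict.ofList
    [ ("CYP2C19", PySem.Dict.ofList [("LOF", PySem.Set.ofList ["rs4244285", "rs4986893"]), ("GOF", PySem.Set.ofList ["rs12248560"])])
    , ("CYP2C9",  PySem.Dict.ofList [("LOF", PySem.Set.ofList ["rs1799853", "rs1057910"])])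
    , ("CYP2D6",  PySem.Dict.ofList [("LOF", PySem.Set.ofList ["rs3892097", "rs5030655"])])
    , ("SLCO1B1", PySem.Dict.ofList [("LOF", PySem.Set.ofList ["rs4149056"])])
    , ("TPMT",    PySem.Dict.ofList [("LOF", PySem.Set.ofList ["rs1800460", "rs1142345"])])
    , ("DPYD",    PySem.Dict.ofList [("LOF", PySem.Set.ofList ["rs3918290", "rs55886062"])]) ]

-- module constant RESULTS: dict keyed by frozensets; lookup is by SET equality (Python hash/eq of frozenset)
def pvResults : List (PySem.Set String × List (String × String)) :=
  [ (PySem.Set.ofList ["LOF", "GOF"], [("diplotype", "*1/*2"), ("phenotype", "IM")])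
  , (PySem.Set.ofList ["LOF"],        [("diplotype", "*2/*2"), ("phenotype", "PM")])
  , (PySem.Set.ofList ["GOF"],        [("diplotype", "*1/*17"), ("phenotype", "RM")])
  , (PySem.Set.ofList [],             [("diplotype", "*1/*1"), ("phenotype", "NM")]) ]

-- RESULTS[key]: first entry whose frozenset key equals the given set (Python frozenset equality)
def pvResultsGet (key : PySem.Set String) : List (String × String) :=
  ((pvResults.find? (fun kv => PySem.Set.equal kv.1 key)).getD (PySem.Set.ofList [], [])).2

def infer_gene_phenotype_alt (gene : String) (rsids_for_gene : List String) : List (String × String) :=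
  if gene = "" ∨ rsids_for_gene = [] then pvResultsGet (PySem.Set.ofList [])
  else
    let seen := PySem.Set.ofList rsids_for_gene
    let present := PySem.Set.ofList
      ((((pvEffectRsids.get? gene).getD PySem.Dict.empty).items.filter
          (fun p => !PySem.Set.isdisjoint seen p.2)).map Prod.fst)
    pvResultsGet present

-- ===== PRECONDITION & SPEC =====
def Spec_infer_gene_phenotype (gene : String) (rsids_for_gene : List String) (out : List (String × String)) : Prop := out = infer_gene_phenotype_alt gene rsids_for_gene
instance (gene : String) (rsids_for_gene : List String) (out : List (String × String)) : Decidable (Spec_infer_gene_phenotype gene rsids_for_gene out) := by unfold Spec_infer_gene_phenotype; infer_instance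

-- ===== CLAIM (what is proved, stated in full; the proofs are below) =====
def Claim_equal_infer_gene_phenotype : Prop := ∀ (gene : String) (rsids_for_gene : List String), Dom_infer_gene_phenotype gene rsids_for_gene → Spec_infer_gene_phenotype gene rsids_for_gene (infer_gene_phenotype gene rsids_for_gene)

-- ===== LEMMAS AND PROOFS =====
-- B's nonempty-intersection test equals an any()-membership scan over the raw rsid list
theorem not_isdisjoint_eq_any (xs ids : List String) :
    (!PySem.Set.isdisjoint (PySem.Set.ofList xs) ids) = xs.any (fun x => ids.contains x) := by
  rw [Bool.eq_iff_iff, Bool.not_eq_true', ← Bool.not_eq_true, PySem.Set.isdisjoint_iff]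
  simp [PySem.Set.mem_ofList, List.any_eq_true]

-- a literal dict's "get? r == some v" is membership of r in the inverted rsid list for v
theorem dict_get_eq_some_eq (ps : List (String × String)) (v : String) (ids : List String)
    (hnd : (ps.map Prod.fst).Nodup)
    (hids : (ps.filter (fun p => p.2 == v)).map Prod.fst = ids) (r : String) :
    ((PySem.Dict.mk ps).get? r == some v) = ids.contains r := by
  subst hids
  induction ps with
  | nil => simp [show (PySem.Dict.mk ([] : List (String × String))).get? r = none from rfl]
  | cons p ps ih =>
    obtain ⟨k, w⟩ := p
    have hnd' : (ps.map Prod.fst).Nodup := (List.nodup_cons.mp hnd).2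
    have hk0 : k ∉ ps.map Prod.fst := (List.nodup_cons.mp hnd).1
    simp only [PySem.Dict.get?_mk_cons, List.filter_cons]
    by_cases hk : k = r
    · subst hk
      by_cases hw : w = v
      · subst hw; simp
      · have hni : k ∉ (ps.filter (fun p => p.2 == v)).map Prod.fst := by
          simp only [List.mem_map, List.mem_filter] at hk0 ⊢
          rintro ⟨p, ⟨hp, _⟩, hfst⟩
          exact hk0 ⟨p, hp, hfst⟩
        simp [hw, hni]
    · by_cases hw : w = v <;> simp [hw, hk, Ne.symm hk, ih hnd']

-- ===== VERDICT (by name: the statement is the Claim_ definition above) =====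
theorem infer_gene_phenotype_spec : Claim_equal_infer_gene_phenotype := by
  unfold Claim_equal_infer_gene_phenotype
  intro gene rsids _
  unfold Spec_infer_gene_phenotype infer_gene_phenotype infer_gene_phenotype_alt
  by_cases hg : gene = "" ∨ rsids = []
  · simp only [hg, if_true]; decide
  · simp only [hg, if_false]
    by_cases h1 : gene = "CYP2C19"
    · subst h1
      have hE : (pvPGX.get? "CYP2C19").getD PySem.Dict.empty = PySem.Dict.mk [("rs4244285", "LOF"), ("rs4986893", "LOF"), ("rs12248560", "GOF")] := by decide
      have hT : ((pvEffectRsids.get? "CYP2C19").getD PySem.Dict.empty).items = ([("LOF", ["rs4244285", "rs4986893"]), ("GOF", ["rs12248560"])] : List (String × List String)) := by decide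
      simp only [hE, hT, List.filter_cons, List.filter_nil,
        dict_get_eq_some_eq [("rs4244285", "LOF"), ("rs4986893", "LOF"), ("rs12248560", "GOF")] "LOF" ["rs4244285", "rs4986893"] (by decide) (by decide),
        dict_get_eq_some_eq [("rs4244285", "LOF"), ("rs4986893", "LOF"), ("rs12248560", "GOF")] "GOF" ["rs12248560"] (by decide) (by decide),
        not_isdisjoint_eq_any]
      cases haL : rsids.any (fun x => List.contains ["rs4244285", "rs4986893"] x) <;>
        cases haG : rsids.any (fun x => List.contains ["rs12248560"] x) <;>
          simp_all <;> decide
    by_cases h2 : gene = "CYP2C9"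
    · subst h2
      have hE : (pvPGX.get? "CYP2C9").getD PySem.Dict.empty = PySem.Dict.mk [("rs1799853", "LOF"), ("rs1057910", "LOF")] := by decide
      have hT : ((pvEffectRsids.get? "CYP2C9").getD PySem.Dict.empty).items = ([("LOF", ["rs1799853", "rs1057910"])] : List (String × List String)) := by decide
      simp only [hE, hT, List.filter_cons, List.filter_nil,
        dict_get_eq_some_eq [("rs1799853", "LOF"), ("rs1057910", "LOF")] "LOF" ["rs1799853", "rs1057910"] (by decide) (by decide),
        dict_get_eq_some_eq [("rs1799853", "LOF"), ("rs1057910", "LOF")] "GOF" ([] : List String) (by decide) (by decide),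
        not_isdisjoint_eq_any]
      cases haL : rsids.any (fun x => List.contains ["rs1799853", "rs1057910"] x) <;>
        cases haG : rsids.any (fun x => List.contains ([] : List String) x) <;>
          simp_all <;> decide
    by_cases h3 : gene = "CYP2D6"
    · subst h3
      have hE : (pvPGX.get? "CYP2D6").getD PySem.Dict.empty = PySem.Dict.mk [("rs3892097", "LOF"), ("rs5030655", "LOF")] := by decide
      have hT : ((pvEffectRsids.get? "CYP2D6").getD PySem.Dict.empty).items = ([("LOF", ["rs3892097", "rs5030655"])] : List (String × List String)) := by decide
      simp only [hE, hT, List.filter_cons, List.filter_nil,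
        dict_get_eq_some_eq [("rs3892097", "LOF"), ("rs5030655", "LOF")] "LOF" ["rs3892097", "rs5030655"] (by decide) (by decide),
        dict_get_eq_some_eq [("rs3892097", "LOF"), ("rs5030655", "LOF")] "GOF" ([] : List String) (by decide) (by decide),
        not_isdisjoint_eq_any]
      cases haL : rsids.any (fun x => List.contains ["rs3892097", "rs5030655"] x) <;>
        cases haG : rsids.any (fun x => List.contains ([] : List String) x) <;>
          simp_all <;> decide
    by_cases h4 : gene = "SLCO1B1"
    · subst h4
      have hE : (pvPGX.get? "SLCO1B1").getD PySem.Dict.empty = PySem.Dict.mk [("rs4149056", "LOF")] := by decide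
      have hT : ((pvEffectRsids.get? "SLCO1B1").getD PySem.Dict.empty).items = ([("LOF", ["rs4149056"])] : List (String × List String)) := by decide
      simp only [hE, hT, List.filter_cons, List.filter_nil,
        dict_get_eq_some_eq [("rs4149056", "LOF")] "LOF" ["rs4149056"] (by decide) (by decide),
        dict_get_eq_some_eq [("rs4149056", "LOF")] "GOF" ([] : List String) (by decide) (by decide),
        not_isdisjoint_eq_any]
      cases haL : rsids.any (fun x => List.contains ["rs4149056"] x) <;>
        cases haG : rsids.any (fun x => List.contains ([] : List String) x) <;>
          simp_all <;> decide
    by_cases h5 : gene = "TPMT"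
    · subst h5
      have hE : (pvPGX.get? "TPMT").getD PySem.Dict.empty = PySem.Dict.mk [("rs1800460", "LOF"), ("rs1142345", "LOF")] := by decide
      have hT : ((pvEffectRsids.get? "TPMT").getD PySem.Dict.empty).items = ([("LOF", ["rs1800460", "rs1142345"])] : List (String × List String)) := by decide
      simp only [hE, hT, List.filter_cons, List.filter_nil,
        dict_get_eq_some_eq [("rs1800460", "LOF"), ("rs1142345", "LOF")] "LOF" ["rs1800460", "rs1142345"] (by decide) (by decide),
        dict_get_eq_some_eq [("rs1800460", "LOF"), ("rs1142345", "LOF")] "GOF" ([] : List String) (by decide) (by decide),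
        not_isdisjoint_eq_any]
      cases haL : rsids.any (fun x => List.contains ["rs1800460", "rs1142345"] x) <;>
        cases haG : rsids.any (fun x => List.contains ([] : List String) x) <;>
          simp_all <;> decide
    by_cases h6 : gene = "DPYD"
    · subst h6
      have hE : (pvPGX.get? "DPYD").getD PySem.Dict.empty = PySem.Dict.mk [("rs3918290", "LOF"), ("rs55886062", "LOF")] := by decide
      have hT : ((pvEffectRsids.get? "DPYD").getD PySem.Dict.empty).items = ([("LOF", ["rs3918290", "rs55886062"])] : List (String × List String)) := by decide
      simp only [hE, hT, List.filter_cons, List.filter_nil,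
        dict_get_eq_some_eq [("rs3918290", "LOF"), ("rs55886062", "LOF")] "LOF" ["rs3918290", "rs55886062"] (by decide) (by decide),
        dict_get_eq_some_eq [("rs3918290", "LOF"), ("rs55886062", "LOF")] "GOF" ([] : List String) (by decide) (by decide),
        not_isdisjoint_eq_any]
      cases haL : rsids.any (fun x => List.contains ["rs3918290", "rs55886062"] x) <;>
        cases haG : rsids.any (fun x => List.contains ([] : List String) x) <;>
          simp_all <;> decide
    -- gene not present in either table: effects dict and inverted index are both empty
    have hE : pvPGX.get? gene = none := by
      rw [PySem.Dict.get?_eq_none_iff_not_mem_keys,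
        show pvPGX.keys = ["CYP2C19", "CYP2C9", "CYP2D6", "SLCO1B1", "TPMT", "DPYD"] from by decide]
      simp [h1, h2, h3, h4, h5, h6]
    have hT : pvEffectRsids.get? gene = none := by
      rw [PySem.Dict.get?_eq_none_iff_not_mem_keys,
        show pvEffectRsids.keys = ["CYP2C19", "CYP2C9", "CYP2D6", "SLCO1B1", "TPMT", "DPYD"] from by decide]
      simp [h1, h2, h3, h4, h5, h6]
    simp only [hE, hT, Option.getD_none,
      show (PySem.Dict.empty : PySem.Dict String (PySem.Set String)).items = [] from rfl,
      List.filter_nil, List.map_nil]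
    simp [PySem.Dict.get?_empty]
    decide
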